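-- pv_equiv track=rewrite | github.com/cms-sw/cmssw | FWCore/GuiBrowsers/python/Vispa/Plugins/EventContentAnalyzer/EventContentDataAccessor.py | applyCommands
-- ===== SOURCE A (Python) =====
-- def applyCommands(content, outputCommands):
--     keep = {}
--     for object in content:
--         keep[object] = True
--     for o in outputCommands:
--         command, filter = o.split(" ")
--         if len(filter.split("_")) > 1:
--             module = filter.split("_")[1]
--         else:
--             module = filter
--         for object in content:
--             if "*" in module:
--                 match = module.strip("*") in object
--             else:
--                 match = module == object
--             if match:
--                 keep[object] = command == "keep"
--     return [object for object in content if keep[object]]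
-- ===== SOURCE B (Python) =====
-- def applyCommands(content, outputCommands):
--     table = []
--     for o in outputCommands:
--         command, filt = o.split(" ")
--         parts = filt.split("_")
--         module = parts[1] if len(parts) > 1 else filt
--         table.append((module, command == "keep"))
--
--     def resolve(obj):
--         for module, keepFlag in reversed(table):
--             if ("*" in module and module.strip("*") in obj) or \
--                ("*" not in module and module == obj):
--                 return keepFlag
--         return True
--
--     return [obj for obj in content if resolve(obj)]
-- ===== Notes on version B (the rewrite author's own statement) =====
-- stated objective: alternative
-- what changed: B parses all commands once into a (module, keep-flag) table and resolves each content object independently by scanning that table in reverse with early exit, instead of A's per-command mutation of a keep dict via a nested scan over content.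
import Mathlib
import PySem

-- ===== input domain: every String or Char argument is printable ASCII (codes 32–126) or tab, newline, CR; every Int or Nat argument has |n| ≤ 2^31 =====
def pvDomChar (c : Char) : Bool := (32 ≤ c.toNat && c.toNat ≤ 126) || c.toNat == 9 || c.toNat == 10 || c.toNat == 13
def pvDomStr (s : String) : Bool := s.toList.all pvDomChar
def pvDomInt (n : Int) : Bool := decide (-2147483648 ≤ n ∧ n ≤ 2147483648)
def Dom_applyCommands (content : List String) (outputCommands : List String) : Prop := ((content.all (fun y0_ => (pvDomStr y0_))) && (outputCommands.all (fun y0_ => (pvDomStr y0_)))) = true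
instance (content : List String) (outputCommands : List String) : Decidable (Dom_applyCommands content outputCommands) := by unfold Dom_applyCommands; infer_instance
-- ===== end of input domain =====

-- B parses the commands once into a (module, keep) table and resolves each object by a reverse
-- scan with early exit, instead of A's per-command mutation of a keep dict over a nested content scan.


-- ===== PORT A =====
-- match test of A's inner loop: "*" in module → stripped substring test, else exact equality
def pvMatchA (module obj : String) : Bool :=
  if PySem.Str.isIn "*" module then
    PySem.Str.isIn (PySem.Str.stripChars module "*") obj
  else module == obj

-- one iteration of A's outer loop: parse o, then scan content updating the keep dict
-- (split? " " is always `some`; the .getD [] is exact)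
def pvStepA (content : List String) (keep : PySem.Dict String Bool) (o : String) :
    PySem.Dict String Bool :=
  match (PySem.Str.split? o " ").getD [] with
  | [command, filter] =>
    let fparts := (PySem.Str.split? filter "_").getD []
    let module := match fparts with | _ :: m :: _ => m | _ => filter
    content.foldl
      (fun d obj => if pvMatchA module obj then d.insert obj (command == "keep") else d) keep
  | _ => keep  -- Python raises ValueError while unpacking here; excluded by Pre_applyCommands

def applyCommands (content : List String) (outputCommands : List String) : List String :=
  let keep := content.foldl (fun d obj => d.insert obj true) (PySem.Dict.empty : PySem.Dict String Bool)
  let keep := outputCommands.foldl (pvStepA content) keep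
  content.filter (fun obj => keep.getD obj true)  -- keep[object]: every content object is a key

-- ===== PORT B =====
-- parse one command into (module, keep-flag); none exactly where Python's unpacking raises
def pvParseB (o : String) : Option (String × Bool) :=
  match (PySem.Str.split? o " ").getD [] with
  | [command, filt] =>
    let parts := (PySem.Str.split? filt "_").getD []
    some ((match parts with | _ :: m :: _ => m | _ => filt), command == "keep")
  | _ => none

def pvHitB (obj : String) (e : String × Bool) : Bool :=
  (PySem.Str.isIn "*" e.1 && PySem.Str.isIn (PySem.Str.stripChars e.1 "*") obj)
  || (!PySem.Str.isIn "*" e.1 && e.1 == obj)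

-- reverse scan with early exit; default True
def pvResolveB (table : List (String × Bool)) (obj : String) : Bool :=
  match table.reverse.find? (pvHitB obj) with
  | some e => e.2
  | none => true

def applyCommands_alt (content : List String) (outputCommands : List String) : List String :=
  let table := outputCommands.filterMap pvParseB
  content.filter (pvResolveB table)

-- ===== PRECONDITION & SPEC =====
-- Pre_ excludes exactly the inputs on which both Pythons raise ValueError while unpacking
-- o.split(" ") into two names (command strings without exactly one space).
def Pre_applyCommands (content : List String) (outputCommands : List String) : Prop :=
  ∀ o ∈ outputCommands, ((PySem.Str.split? o " ").getD []).length = 2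
instance (content : List String) (outputCommands : List String) : Decidable (Pre_applyCommands content outputCommands) := by unfold Pre_applyCommands; infer_instance

def pvWitness_applyCommands : List String × List String :=
  (["modA", "modB", "x_modC_lbl"], ["drop *", "keep modA", "keep f_modC"])

def Spec_applyCommands (content : List String) (outputCommands : List String) (out : List String) : Prop := out = applyCommands_alt content outputCommands
instance (content : List String) (outputCommands : List String) (out : List String) : Decidable (Spec_applyCommands content outputCommands out) := by unfold Spec_applyCommands; infer_instance

-- ===== CLAIM (what is proved, stated in full; the proofs are below) =====
def Claim_equal_applyCommands : Prop := ∀ (content : List String) (outputCommands : List String), Dom_applyCommands content outputCommands → Pre_applyCommands content outputCommands → Spec_applyCommands content outputCommands (applyCommands content outputCommands)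

-- ===== LEMMAS AND PROOFS =====

-- A's match test equals B's hit predicate
theorem matchA_eq_hitB (m obj : String) (k : Bool) :
    pvMatchA m obj = pvHitB obj (m, k) := by
  unfold pvMatchA pvHitB
  cases h : PySem.Str.isIn "*" m <;> simp [h]

-- effect of A's inner content loop on one key of the dict
theorem innerA_getD (m : String) (c : Bool) (obj : String) (dv : Bool) :
    ∀ (l : List String) (d : PySem.Dict String Bool),
    (l.foldl (fun d x => if pvMatchA m x then d.insert x c else d) d).getD obj dv
      = if obj ∈ l ∧ pvMatchA m obj then c else d.getD obj dv := by
  intro l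
  induction l with
  | nil => intro d; simp
  | cons x t ih =>
    intro d
    rw [List.foldl_cons, ih]
    by_cases he : obj = x
    · subst he
      by_cases hm : pvMatchA m obj = true
      · simp [hm, PySem.Dict.getD_insert, List.mem_cons]
      · simp [hm, List.mem_cons]
    · by_cases hm : pvMatchA m obj = true <;>
        by_cases ht : obj ∈ t <;>
          simp [hm, ht, he, List.mem_cons, PySem.Dict.getD_insert] <;>
          split_ifs <;> simp [PySem.Dict.getD_insert, he]

-- effect of A's command loop on one content key = forward fold over B's parsed table
theorem cmdsA_getD (content : List String) (obj : String) (hobj : obj ∈ content) (dv : Bool) :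
    ∀ (cmds : List String) (d : PySem.Dict String Bool),
    (∀ o ∈ cmds, ((PySem.Str.split? o " ").getD []).length = 2) →
    (cmds.foldl (pvStepA content) d).getD obj dv
      = (cmds.filterMap pvParseB).foldl (fun b e => if pvHitB obj e then e.2 else b) (d.getD obj dv) := by
  intro cmds
  induction cmds with
  | nil => intro d _; simp
  | cons o t ih =>
    intro d hpre
    have h2 := hpre o (List.mem_cons_self ..)
    obtain ⟨command, filter, hsp⟩ : ∃ c f, (PySem.Str.split? o " ").getD [] = [c, f] := by
      cases hl : (PySem.Str.split? o " ").getD [] with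
      | nil => simp [hl] at h2
      | cons a t2 =>
        cases t2 with
        | nil => simp [hl] at h2
        | cons b t3 =>
          cases t3 with
          | nil => exact ⟨a, b, rfl⟩
          | cons _ _ => simp [hl] at h2
    rw [List.foldl_cons, ih _ (fun o ho => hpre o (List.mem_cons_of_mem _ ho))]
    simp only [List.filterMap_cons, pvParseB, pvStepA, hsp, List.foldl_cons]
    congr 1
    rw [innerA_getD]
    simp only [hobj, true_and]
    rw [matchA_eq_hitB _ _ (command == "keep")]

-- the initial dict gives true for every key (present keys were inserted true, default is true)
theorem initA_getD (obj : String) :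
    ∀ (l : List String) (d : PySem.Dict String Bool), d.getD obj true = true →
    (l.foldl (fun d x => d.insert x true) d).getD obj true = true := by
  intro l
  induction l with
  | nil => intro d h; simpa using h
  | cons x t ih =>
    intro d h
    rw [List.foldl_cons]
    apply ih
    rw [PySem.Dict.getD_insert]
    split <;> simp [h]

-- reverse-scan-with-early-exit = forward fold (last match wins)
theorem find?_reverse_eq_foldl (obj : String) :
    ∀ (table : List (String × Bool)) (dv : Bool),
    (match table.reverse.find? (pvHitB obj) with
     | some e => e.2
     | none => dv)
      = table.foldl (fun b e => if pvHitB obj e then e.2 else b) dv := by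
  intro table
  induction table with
  | nil => intro dv; simp
  | cons e t ih =>
    intro dv
    rw [List.foldl_cons, ← ih]
    simp only [List.reverse_cons, List.find?_append]
    cases h : t.reverse.find? (pvHitB obj) with
    | some v => simp
    | none =>
      simp only [Option.none_or]
      cases hh : pvHitB obj e <;> simp [List.find?, hh]

-- ===== VERDICT (by name: the statement is the Claim_ definition above) =====
theorem applyCommands_spec : Claim_equal_applyCommands := by
  intro content outputCommands _hdom hpre
  unfold Spec_applyCommands applyCommands applyCommands_alt
  apply List.filter_congr
  intro obj hobj
  rw [cmdsA_getD content obj hobj true outputCommands _ hpre,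
      initA_getD obj content PySem.Dict.empty (by simp),
      ← find?_reverse_eq_foldl]
  rfl
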